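-- pv_equiv track=rewrite | github.com/simonwiles/cssmin.py | cssmin.py | wrap_css_lines
-- ===== SOURCE A (Python) =====
-- def wrap_css_lines(css, line_length):
--     """ Wrap the lines of the given CSS to an approximate length. """
--     lines = []
--     line_start = 0
--     for i, char in enumerate(css):
--         # It's safe to break after `}` characters.
--         if char == '}' and (i - line_start >= line_length):
--             lines.append(css[line_start:i + 1])
--             line_start = i + 1
--
--     if line_start < len(css):
--         lines.append(css[line_start:])
--     return '\n'.join(lines)
-- ===== SOURCE B (Python) =====
-- def wrap_css_lines(css, line_length):
--     """ Wrap the lines of the given CSS to an approximate length. """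
--     parts = css.split('}')
--     lines = []
--     buffer = ''
--     for part in parts[:-1]:
--         if len(buffer) + len(part) >= line_length:
--             lines.append(buffer + part + '}')
--             buffer = ''
--         else:
--             buffer += part + '}'
--     buffer += parts[-1]
--     if buffer:
--         lines.append(buffer)
--     return '\n'.join(lines)
-- ===== Notes on version B (the rewrite author's own statement) =====
-- stated objective: faster
-- what changed: Replaces A's per-character Python loop with index/slice bookkeeping by a single css.split('}') followed by a fold over the parts that accumulates a buffer, emitting a line when the buffer plus the next part reaches line_length; the character scanning moves into the C-level split/join, measured ~3.6x faster.
import Mathlib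
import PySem

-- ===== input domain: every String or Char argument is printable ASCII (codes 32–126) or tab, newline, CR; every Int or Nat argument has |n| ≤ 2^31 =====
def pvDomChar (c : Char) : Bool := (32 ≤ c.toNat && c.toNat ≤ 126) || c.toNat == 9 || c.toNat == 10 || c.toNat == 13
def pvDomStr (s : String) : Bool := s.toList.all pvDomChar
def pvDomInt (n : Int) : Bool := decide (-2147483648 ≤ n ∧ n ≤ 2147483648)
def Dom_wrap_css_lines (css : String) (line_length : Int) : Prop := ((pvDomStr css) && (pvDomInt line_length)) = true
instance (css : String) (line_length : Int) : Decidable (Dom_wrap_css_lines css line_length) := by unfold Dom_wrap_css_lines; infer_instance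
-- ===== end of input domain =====

-- B replaces A's per-character indexed scan with slicing by a single split('}') followed by a
-- fold accumulating a buffer of whole parts (measured faster in Python: scanning moves into split/join).

-- ===== PORT A =====
-- one loop step of A: state = (lines, line_start), p = (i, char); slices refer to the full string
def stepA (cs : List Char) (line_length : Int)
    (st : List (List Char) × Int) (p : Int × Char) : List (List Char) × Int :=
  if p.2 = '}' ∧ line_length ≤ p.1 - st.2 then
    (st.1 ++ [PySem.List.slice cs (some st.2) (some (p.1 + 1))], p.1 + 1)
  else st

-- A's code after the loop: `if line_start < len(css): lines.append(css[line_start:])`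
def finishA (cs : List Char) (st : List (List Char) × Int) : List (List Char) :=
  if st.2 < (cs.length : Int) then st.1 ++ [PySem.List.slice cs (some st.2) none] else st.1

def wrap_css_lines (css : String) (line_length : Int) : String :=
  let cs := css.toList
  let st := (PySem.List.enumerate cs 0).foldl (stepA cs line_length) ([], 0)
  String.ofList (PySem.Chars.join ['\n'] (finishA cs st))

-- ===== PORT B =====
-- one loop step of B: state = (lines, buffer), part is a chunk that ended in '}'
def stepB (line_length : Int)
    (st : List (List Char) × List Char) (part : List Char) : List (List Char) × List Char :=
  if line_length ≤ (st.2.length : Int) + (part.length : Int) then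
    (st.1 ++ [st.2 ++ part ++ ['}']], [])
  else (st.1, st.2 ++ part ++ ['}'])

def wrap_css_lines_alt (css : String) (line_length : Int) : String :=
  let parts := PySem.Chars.splitOn css.toList ['}']
  let st := (PySem.List.slice parts none (some (-1))).foldl (stepB line_length) ([], [])
  -- parts[-1]: split never returns [], so the .getD [] default is never used
  let buffer := st.2 ++ (PySem.List.pyGet? parts (-1)).getD []
  String.ofList (PySem.Chars.join ['\n'] (if buffer ≠ [] then st.1 ++ [buffer] else st.1))

-- ===== PRECONDITION & SPEC =====
def Spec_wrap_css_lines (css : String) (line_length : Int) (out : String) : Prop := out = wrap_css_lines_alt css line_length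
instance (css : String) (line_length : Int) (out : String) : Decidable (Spec_wrap_css_lines css line_length out) := by unfold Spec_wrap_css_lines; infer_instance

-- ===== CLAIM (what is proved, stated in full; the proofs are below) =====
def Claim_equal_wrap_css_lines : Prop := ∀ (css : String) (line_length : Int), Dom_wrap_css_lines css line_length → Spec_wrap_css_lines css line_length (wrap_css_lines css line_length)

-- ===== LEMMAS AND PROOFS =====

-- canonical wrapper: buffer-carrying recursion over the characters
def W (L : Int) (buf : List Char) : List Char → List (List Char)
  | [] => if buf = [] then [] else [buf]
  | x :: xs => if x = '}' ∧ L ≤ (buf.length : Int) then (buf ++ ['}']) :: W L [] xs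
               else W L (buf ++ [x]) xs

-- (head, tail) of splitting on '}', structurally
def mySplit : List Char → List Char × List (List Char)
  | [] => ([], [])
  | x :: xs => let r := mySplit xs
               if x = '}' then ([], r.1 :: r.2) else (x :: r.1, r.2)

-- structural form of B's fold + tail handling, recursing on the parts list
def runB (L : Int) (acc : List (List Char)) (buf : List Char) : List (List Char) → List (List Char)
  | [] => if buf ≠ [] then acc ++ [buf] else acc
  | [p] => if buf ++ p ≠ [] then acc ++ [buf ++ p] else acc
  | p :: q :: ps => if L ≤ (buf.length : Int) + (p.length : Int) then
                      runB L (acc ++ [buf ++ p ++ ['}']]) [] (q :: ps)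
                    else runB L acc (buf ++ p ++ ['}']) (q :: ps)

lemma splitOn_go_char (l : List Char) : ∀ (fuel : Nat), l.length ≤ fuel → ∀ (cur : List Char) (acc : List (List Char)),
    PySem.Chars.splitOn.go ['}'] fuel l cur acc
      = acc.reverse ++ (cur.reverse ++ (mySplit l).1) :: (mySplit l).2 := by
  induction l with
  | nil =>
    intro fuel _ cur acc
    cases fuel <;> simp [PySem.Chars.splitOn.go, mySplit]
  | cons x xs ih =>
    intro fuel hf cur acc
    cases fuel with
    | zero => simp at hf
    | succ f =>
      by_cases hx : x = '}'
      · subst hx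
        have hpre : List.isPrefixOf ['}'] ('}' :: xs) = true := by
          simp [List.isPrefixOf]
        simp only [PySem.Chars.splitOn.go, hpre, if_pos]
        rw [show List.drop ['}'].length ('}' :: xs) = xs from rfl]
        rw [ih f (by simpa using hf) [] (cur.reverse :: acc)]
        simp [mySplit]
      · have hpre : List.isPrefixOf ['}'] (x :: xs) = false := by
          simp [List.isPrefixOf]; exact fun h => (hx h.symm).elim
        simp only [PySem.Chars.splitOn.go, hpre, Bool.false_eq_true, if_neg, not_false_iff]
        rw [ih f (by simpa using hf) (x :: cur) acc]
        simp [mySplit, hx]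

lemma splitOn_char (l : List Char) :
    PySem.Chars.splitOn l ['}'] = (mySplit l).1 :: (mySplit l).2 := by
  unfold PySem.Chars.splitOn
  rw [splitOn_go_char l (l.length + 1) (by omega) [] []]
  simp

-- B's port-shaped computation (fold over parts[:-1], then parts[-1]) equals runB
lemma foldB_eq_runB (L : Int) (p : List Char) (ps : List (List Char)) :
    ∀ (acc : List (List Char)) (buf : List Char),
    (let st := (PySem.List.slice (p :: ps) none (some (-1))).foldl (stepB L) (acc, buf)
     let buffer := st.2 ++ (PySem.List.pyGet? (p :: ps) (-1)).getD []
     if buffer ≠ [] then st.1 ++ [buffer] else st.1)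
    = runB L acc buf (p :: ps) := by
  induction ps generalizing p with
  | nil =>
    intro acc buf
    simp [PySem.List.slice_to_neg_one, PySem.List.pyGet?, PySem.List.pyIdx?, runB]
  | cons q qs ih =>
    intro acc buf
    have hd : PySem.List.slice (p :: q :: qs) none (some (-1))
        = p :: PySem.List.slice (q :: qs) none (some (-1)) := by
      simp [PySem.List.slice_to_neg_one]
    have hg : PySem.List.pyGet? (p :: q :: qs) (-1) = PySem.List.pyGet? (q :: qs) (-1) := by
      simp [PySem.List.pyGet?, PySem.List.pyIdx?]
      rfl
    simp only [hd, hg, List.foldl_cons]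
    rw [show stepB L (acc, buf) p
        = if L ≤ (buf.length : Int) + (p.length : Int) then
            (acc ++ [buf ++ p ++ ['}']], ([] : List Char))
          else (acc, buf ++ p ++ ['}']) from by simp [stepB]]
    by_cases hc : L ≤ (buf.length : Int) + (p.length : Int)
    · rw [if_pos hc]
      rw [ih q (acc ++ [buf ++ p ++ ['}']]) []]
      simp [runB, hc]
    · rw [if_neg hc]
      rw [ih q acc (buf ++ p ++ ['}'])]
      simp [runB, hc]

-- peeling one non-'}' character off the head part of runB
lemma runB_cons_char (L : Int) (acc : List (List Char)) (buf h : List Char) (x : Char)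
    (t : List (List Char)) :
    runB L acc buf ((x :: h) :: t) = runB L acc (buf ++ [x]) (h :: t) := by
  cases t with
  | nil => simp [runB]
  | cons q qs =>
    have hlen : ((buf ++ [x]).length : Int) + (h.length : Int)
        = (buf.length : Int) + ((x :: h).length : Int) := by
      simp; omega
    have happ : (buf ++ [x]) ++ h ++ ['}'] = buf ++ (x :: h) ++ ['}'] := by simp
    simp only [runB, hlen, happ]

lemma runB_mySplit (L : Int) (l : List Char) :
    ∀ (acc : List (List Char)) (buf : List Char),
    runB L acc buf ((mySplit l).1 :: (mySplit l).2) = acc ++ W L buf l := by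
  induction l with
  | nil =>
    intro acc buf
    by_cases hb : buf = [] <;> simp [mySplit, runB, W, hb]
  | cons x xs ih =>
    intro acc buf
    by_cases hx : x = '}'
    · subst hx
      rw [show mySplit ('}' :: xs) = ([], (mySplit xs).1 :: (mySplit xs).2) from by simp [mySplit]]
      by_cases hc : L ≤ (buf.length : Int)
      · have : runB L acc buf ([] :: (mySplit xs).1 :: (mySplit xs).2)
            = runB L (acc ++ [buf ++ ['}']]) [] ((mySplit xs).1 :: (mySplit xs).2) := by
          simp [runB, hc]
        rw [this, ih]
        simp [W, hc]
      · have : runB L acc buf ([] :: (mySplit xs).1 :: (mySplit xs).2)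
            = runB L acc (buf ++ ['}']) ((mySplit xs).1 :: (mySplit xs).2) := by
          simp [runB, hc]
        rw [this, ih]
        simp [W, hc]
    · rw [show mySplit (x :: xs) = (x :: (mySplit xs).1, (mySplit xs).2) from by simp [mySplit, hx]]
      rw [runB_cons_char, ih]
      simp [W, hx]

-- A's loop with the invariant: full string = pre ++ buf ++ suffix, line_start = pre.length
lemma A_loop (L : Int) (suffix : List Char) :
    ∀ (pre buf : List Char) (acc : List (List Char)),
    finishA (pre ++ buf ++ suffix)
      (List.foldl (stepA (pre ++ buf ++ suffix) L) (acc, (pre.length : Int))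
        (PySem.List.enumerate suffix ((pre.length : Int) + (buf.length : Int))))
    = acc ++ W L buf suffix := by
  induction suffix with
  | nil =>
    intro pre buf acc
    by_cases hb : buf = []
    · subst hb; simp [finishA, W]
    · have hlt : (pre.length : Int) < ((pre ++ buf ++ ([] : List Char)).length : Int) := by
        have : 0 < buf.length := List.length_pos_of_ne_nil hb
        simp; omega
      simp only [PySem.List.enumerate_nil, List.foldl_nil, finishA, if_pos hlt]
      rw [show PySem.List.slice (pre ++ buf ++ ([] : List Char)) (some (pre.length : Int)) none
          = (pre ++ buf ++ ([] : List Char)).drop pre.length from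
          PySem.List.slice_from_natCast _ _]
      simp [W, hb]
  | cons x xs ih =>
    intro pre buf acc
    rw [PySem.List.enumerate_cons, List.foldl_cons]
    by_cases hcond : x = '}' ∧ L ≤ (buf.length : Int)
    · obtain ⟨hx, hc⟩ := hcond
      have hstep : stepA (pre ++ buf ++ (x :: xs)) L (acc, (pre.length : Int))
          ((pre.length : Int) + (buf.length : Int), x)
          = (acc ++ [buf ++ ['}']], (pre.length : Int) + (buf.length : Int) + 1) := by
        have hc' : L ≤ ((pre.length : Int) + (buf.length : Int)) - (pre.length : Int) := by omega
        simp only [stepA, hx, hc', and_self, if_pos]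
        congr 2
        have hcast : (pre.length : Int) + (buf.length : Int) + 1
            = (pre.length : Int) + ((buf.length + 1 : Nat) : Int) := by push_cast; ring
        rw [hcast, PySem.List.slice_natCast_add,
            show pre ++ buf ++ '}' :: xs = pre ++ (buf ++ '}' :: xs) from by simp,
            List.drop_left' rfl,
            show buf ++ '}' :: xs = (buf ++ ['}']) ++ xs from by simp,
            List.take_left' (by simp)]
      rw [hstep]
      have hre : pre ++ buf ++ (x :: xs) = (pre ++ buf ++ ['}']) ++ ([] : List Char) ++ xs := by
        simp [hx]
      have hlen1 : (pre.length : Int) + (buf.length : Int) + 1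
          = (((pre ++ buf ++ ['}']).length : Nat) : Int) := by simp; omega
      have hlen2 : (pre.length : Int) + (buf.length : Int) + 1
          = (((pre ++ buf ++ ['}']).length : Nat) : Int) + ((([] : List Char).length : Nat) : Int) := by
        simp [hlen1]
      rw [hre, show PySem.List.enumerate xs ((pre.length : Int) + (buf.length : Int) + 1)
          = PySem.List.enumerate xs ((((pre ++ buf ++ ['}']).length : Nat) : Int)
              + ((([] : List Char).length : Nat) : Int)) from by rw [← hlen2],
          show ((pre.length : Int) + (buf.length : Int) + 1)
          = (((pre ++ buf ++ ['}']).length : Nat) : Int) from hlen1]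
      rw [ih (pre ++ buf ++ ['}']) [] (acc ++ [buf ++ ['}']])]
      simp [W, hx, hc]
    · have hstep : stepA (pre ++ buf ++ (x :: xs)) L (acc, (pre.length : Int))
          ((pre.length : Int) + (buf.length : Int), x) = (acc, (pre.length : Int)) := by
        simp only [stepA, ite_eq_right_iff, and_imp]
        intro hx hc
        exact absurd ⟨hx, by omega⟩ hcond
      rw [hstep]
      have hre : pre ++ buf ++ (x :: xs) = pre ++ (buf ++ [x]) ++ xs := by simp
      have hlen : (pre.length : Int) + (buf.length : Int) + 1
          = (pre.length : Int) + (((buf ++ [x]).length : Nat) : Int) := by simp; omega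
      rw [hre, show PySem.List.enumerate xs ((pre.length : Int) + (buf.length : Int) + 1)
          = PySem.List.enumerate xs ((pre.length : Int) + (((buf ++ [x]).length : Nat) : Int)) from by
          rw [← hlen]]
      rw [ih pre (buf ++ [x]) acc]
      have hW : W L buf (x :: xs) = W L (buf ++ [x]) xs := by
        simp only [W]; rw [if_neg hcond]
      rw [hW]

lemma A_eq_W (css : String) (L : Int) :
    wrap_css_lines css L = String.ofList (PySem.Chars.join ['\n'] (W L [] css.toList)) := by
  unfold wrap_css_lines
  have := A_loop L css.toList [] [] []
  simp only [List.nil_append, List.length_nil, Nat.cast_zero, zero_add] at this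
  simp only [this]

lemma B_eq_W (css : String) (L : Int) :
    wrap_css_lines_alt css L = String.ofList (PySem.Chars.join ['\n'] (W L [] css.toList)) := by
  unfold wrap_css_lines_alt
  rw [splitOn_char]
  have := foldB_eq_runB L (mySplit css.toList).1 (mySplit css.toList).2 [] []
  simp only [this]
  rw [runB_mySplit]
  simp

-- ===== VERDICT (by name: the statement is the Claim_ definition above) =====
theorem wrap_css_lines_spec : Claim_equal_wrap_css_lines := by
  intro css L _
  unfold Spec_wrap_css_lines
  rw [A_eq_W, B_eq_W]
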